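-- pv_equiv track=rewrite | github.com/ahmetdenizeroz/ME461_BizimBulbuller | Final_Project/ImgProc/GridDetectionFinal.py | sort_into_grid
-- ===== SOURCE A (Python) =====
-- def sort_into_grid(intersections):
--     if not intersections:
--         return []
--     sorted_pts = sorted(intersections, key=lambda p: (p[1], p[0]))
--     grid_rows = []
--     row_tolerance = 20
--     current_row = [sorted_pts[0]]
--     for i in range(1, len(sorted_pts)):
--         if abs(sorted_pts[i][1] - current_row[-1][1]) < row_tolerance:
--             current_row.append(sorted_pts[i])
--         else:
--             grid_rows.append(sorted(current_row, key=lambda p: p[0]))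
--             current_row = [sorted_pts[i]]
--     grid_rows.append(sorted(current_row, key=lambda p: p[0]))
--     return grid_rows
-- ===== SOURCE B (Python) =====
-- def sort_into_grid(intersections):
--     if not intersections:
--         return []
--     pts = sorted(intersections, key=lambda p: (p[1], p[0]))
--     # phase 1: find the row boundaries (positions where the y-gap to the previous point is >= 20)
--     cuts = [i for i, (a, b) in enumerate(zip(pts, pts[1:]), 1) if abs(b[1] - a[1]) >= 20]
--     bounds = [0] + cuts + [len(pts)]
--     # phase 2: slice the sorted list at those boundaries and x-sort each row
--     return [sorted(pts[a:b], key=lambda p: p[0]) for a, b in zip(bounds, bounds[1:])]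
-- ===== Notes on version B (the rewrite author's own statement) =====
-- stated objective: alternative
-- what changed: B replaces A's interleaved append/close accumulator loop by a two-phase decomposition: one pass over consecutive pairs of the (y,x)-sorted points collects the boundary indices where the y-gap is >= 20, then the rows are produced by slicing the sorted list at those boundaries and x-sorting each slice.
import Mathlib
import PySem

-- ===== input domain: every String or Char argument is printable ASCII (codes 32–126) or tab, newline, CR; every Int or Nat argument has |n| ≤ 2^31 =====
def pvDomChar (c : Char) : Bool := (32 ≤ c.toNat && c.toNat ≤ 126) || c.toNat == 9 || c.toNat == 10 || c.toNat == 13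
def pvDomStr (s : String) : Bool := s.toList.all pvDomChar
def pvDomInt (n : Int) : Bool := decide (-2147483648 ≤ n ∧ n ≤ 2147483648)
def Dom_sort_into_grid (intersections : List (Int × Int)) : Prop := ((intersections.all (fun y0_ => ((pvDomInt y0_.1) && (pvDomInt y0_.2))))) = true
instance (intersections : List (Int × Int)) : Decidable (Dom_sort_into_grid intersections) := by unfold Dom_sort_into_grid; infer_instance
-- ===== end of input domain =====

-- B re-groups the points in two phases (boundary indices, then slicing) instead of A's
-- interleaved append/close accumulator loop; objective: alternative decomposition, same O(n log n) cost.

-- ===== PORT A =====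
-- the for-loop over range(1, len(sorted_pts)) as structural recursion over the remaining
-- points, with the same state (grid_rows, current_row); current_row is never empty, and
-- current_row[-1] is ported exactly as pyGetD … (-1).
def pvALoop (gridRows : List (List (Int × Int))) (currentRow : List (Int × Int)) :
    List (Int × Int) → List (List (Int × Int))
  | [] => gridRows ++ [PySem.List.sorted currentRow (fun p => p.1)]
  | p :: rest =>
    if |p.2 - (PySem.List.pyGetD currentRow (-1) (0, 0)).2| < 20 then
      pvALoop gridRows (currentRow ++ [p]) rest
    else
      pvALoop (gridRows ++ [PySem.List.sorted currentRow (fun p => p.1)]) [p] rest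

def sort_into_grid (intersections : List (Int × Int)) : List (List (Int × Int)) :=
  if intersections = [] then []
  else
    match PySem.List.sorted2 intersections (fun p => p.2) (fun p => p.1) with
    | [] => []  -- unreachable: sorted of a nonempty list is nonempty
    | q :: rest => pvALoop [] [q] rest

-- ===== PORT B =====
def sort_into_grid_alt (intersections : List (Int × Int)) : List (List (Int × Int)) :=
  if intersections = [] then []
  else
    let pts := PySem.List.sorted2 intersections (fun p => p.2) (fun p => p.1)
    -- cuts = [i for i, (a, b) in enumerate(zip(pts, pts[1:]), 1) if abs(b[1] - a[1]) >= 20]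
    let cuts := ((PySem.List.enumerate (pts.zip (PySem.List.slice pts (some 1) none)) 1).filter
        (fun x => decide (20 ≤ |x.2.2.2 - x.2.1.2|))).map (·.1)
    -- bounds = [0] + cuts + [len(pts)]
    let bounds := 0 :: cuts ++ [PySem.List.len pts]
    (bounds.zip (PySem.List.slice bounds (some 1) none)).map
      (fun ab => PySem.List.sorted (PySem.List.slice pts (some ab.1) (some ab.2)) (fun p => p.1))

-- ===== PRECONDITION & SPEC =====
def Spec_sort_into_grid (intersections : List (Int × Int)) (out : List (List (Int × Int))) : Prop := out = sort_into_grid_alt intersections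
instance (intersections : List (Int × Int)) (out : List (List (Int × Int))) : Decidable (Spec_sort_into_grid intersections out) := by unfold Spec_sort_into_grid; infer_instance

-- ===== CLAIM (what is proved, stated in full; the proofs are below) =====
def Claim_equal_sort_into_grid : Prop := ∀ (intersections : List (Int × Int)), Dom_sort_into_grid intersections → Spec_sort_into_grid intersections (sort_into_grid intersections)

-- ===== LEMMAS AND PROOFS =====

-- the common row decomposition both programs compute (before the per-row x-sort)
def pvChunks : List (Int × Int) → List (List (Int × Int))
  | [] => []
  | [p] => [[p]]
  | p :: q :: rest =>
    if 20 ≤ |q.2 - p.2| then [p] :: pvChunks (q :: rest)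
    else
      match pvChunks (q :: rest) with
      | [] => [[p]]
      | r :: rs => (p :: r) :: rs

lemma pvChunks_cons (p : Int × Int) (l : List (Int × Int)) :
    ∃ t rs, pvChunks (p :: l) = (p :: t) :: rs := by
  induction l generalizing p with
  | nil => exact ⟨[], [], rfl⟩
  | cons q rest ih =>
    by_cases h : 20 ≤ |q.2 - p.2|
    · exact ⟨[], pvChunks (q :: rest), by simp [pvChunks, h]⟩
    · obtain ⟨t, rs, ht⟩ := ih q
      exact ⟨q :: t, rs, by simp [pvChunks, h, ht]⟩

-- how A's pending current_row merges with the chunks of the remaining points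
def pvGlue (cur : List (Int × Int)) : List (List (Int × Int)) → List (List (Int × Int))
  | [] => [cur]
  | r :: rs =>
    if |(r.headD (0, 0)).2 - (PySem.List.pyGetD cur (-1) (0, 0)).2| < 20 then
      (cur ++ r) :: rs
    else cur :: r :: rs

lemma pvGlue_singleton (p : Int × Int) (l : List (Int × Int)) :
    pvGlue [p] (pvChunks l) = pvChunks (p :: l) := by
  cases l with
  | nil => rfl
  | cons q rest =>
    obtain ⟨t, rs, ht⟩ := pvChunks_cons q rest
    have hlast : PySem.List.pyGetD [p] (-1) ((0 : Int), (0 : Int)) = p := by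
      simpa using PySem.List.pyGetD_neg_one_append_singleton (xs := []) (x := p) (d := ((0:Int),(0:Int)))
    by_cases h : 20 ≤ |q.2 - p.2|
    · simp [pvGlue, pvChunks, ht, hlast, h, not_lt.mpr h]
    · simp [pvGlue, pvChunks, ht, hlast, h, lt_of_not_ge h]

lemma pvGlue_concat (cur : List (Int × Int)) (p : Int × Int) (rest : List (Int × Int))
    (t : List (Int × Int)) (rs : List (List (Int × Int)))
    (hc : pvChunks (p :: rest) = (p :: t) :: rs) :
    pvGlue (cur ++ [p]) (pvChunks rest) = (cur ++ p :: t) :: rs := by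
  have hlast : PySem.List.pyGetD (cur ++ [p]) (-1) ((0 : Int), (0 : Int)) = p :=
    PySem.List.pyGetD_neg_one_append_singleton cur p ((0 : Int), (0 : Int))
  cases rest with
  | nil =>
    simp [pvChunks] at hc
    obtain ⟨ht, hrs⟩ := hc
    subst ht; subst hrs
    simp [pvGlue, pvChunks]
  | cons q rest' =>
    obtain ⟨t', rs', ht'⟩ := pvChunks_cons q rest'
    by_cases h : 20 ≤ |q.2 - p.2|
    · simp [pvChunks, h, ht'] at hc
      obtain ⟨ht, hrs⟩ := hc
      subst ht; subst hrs
      simp [pvGlue, ht', hlast, not_lt.mpr h]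
    · simp [pvChunks, h, ht'] at hc
      obtain ⟨ht, hrs⟩ := hc
      subst ht; subst hrs
      simp [pvGlue, ht', hlast, lt_of_not_ge h]

lemma pvALoop_glue (l : List (Int × Int)) :
    ∀ (rows : List (List (Int × Int))) (cur : List (Int × Int)),
      pvALoop rows cur l =
        rows ++ (pvGlue cur (pvChunks l)).map (fun r => PySem.List.sorted r (fun p => p.1)) := by
  induction l with
  | nil => intro rows cur; simp [pvALoop, pvGlue, pvChunks]
  | cons p rest ih =>
    intro rows cur
    obtain ⟨t, rs, ht⟩ := pvChunks_cons p rest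
    by_cases h : |p.2 - (PySem.List.pyGetD cur (-1) ((0 : Int), (0 : Int))).2| < 20
    · rw [pvALoop, if_pos h, ih, pvGlue_concat cur p rest t rs ht, ht]
      simp [pvGlue, h]
    · rw [pvALoop, if_neg h, ih, pvGlue_singleton, ht]
      simp [pvGlue, h]

-- ===== B-side lemmas =====

def pvCuts (pts : List (Int × Int)) : List Int :=
  ((PySem.List.enumerate (pts.zip pts.tail) 1).filter
      (fun x => decide (20 ≤ |x.2.2.2 - x.2.1.2|))).map (·.1)

def pvSl (pts : List (Int × Int)) : List (List (Int × Int)) :=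
  ((0 :: (pvCuts pts ++ [(pts.length : Int)])).zip (pvCuts pts ++ [(pts.length : Int)])).map
    (fun ab => PySem.List.slice pts (some ab.1) (some ab.2))

lemma pvEnumerate_shift {α : Type} (xs : List α) (s : Int) :
    PySem.List.enumerate xs (s + 1) = (PySem.List.enumerate xs s).map (fun p => (p.1 + 1, p.2)) := by
  induction xs generalizing s with
  | nil => simp [PySem.List.enumerate_nil]
  | cons x xs ih => simp [PySem.List.enumerate_cons, ih]

lemma pvCuts_cons (p q : Int × Int) (rest : List (Int × Int)) :
    pvCuts (p :: q :: rest) =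
      (if 20 ≤ |q.2 - p.2| then [1] else []) ++ (pvCuts (q :: rest)).map (· + 1) := by
  show ((PySem.List.enumerate ((p, q) :: (q :: rest).zip rest) 1).filter _).map _ = _
  rw [PySem.List.enumerate_cons]
  rw [show (1 : Int) + 1 = 1 + 1 from rfl, pvEnumerate_shift]
  rw [List.filter_cons, List.filter_map]
  by_cases h : 20 ≤ |q.2 - p.2| <;>
    simp [h, pvCuts, List.map_map, Function.comp_def]

lemma pvCuts_pos (pts : List (Int × Int)) : ∀ c ∈ pvCuts pts, 1 ≤ c := by
  intro c hc
  unfold pvCuts at hc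
  obtain ⟨x, hx, rfl⟩ := List.mem_map.mp hc
  have hx' := List.mem_filter.mp hx |>.1
  obtain ⟨k, hk, hx⟩ := (PySem.List.mem_enumerate_iff _ _ _).mp hx'
  subst hx
  simp

lemma pvSlice_zero_one (x : Int × Int) (l : List (Int × Int)) :
    PySem.List.slice (x :: l) (some 0) (some 1) = [x] := by
  rw [show ((0 : Int)) = ((0 : Nat) : Int) from rfl, show ((1 : Int)) = ((1 : Nat) : Int) from rfl,
    PySem.List.slice_natCast]
  simp

lemma pvSlice_shift (x : Int × Int) (l : List (Int × Int)) (a b : Int)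
    (ha : 0 ≤ a) (hb : 0 ≤ b) :
    PySem.List.slice (x :: l) (some (a + 1)) (some (b + 1)) = PySem.List.slice l (some a) (some b) := by
  obtain ⟨m, rfl⟩ := Int.eq_ofNat_of_zero_le ha
  obtain ⟨k, rfl⟩ := Int.eq_ofNat_of_zero_le hb
  rw [show ((m : Int) + 1) = ((m + 1 : Nat) : Int) by push_cast; ring,
    show ((k : Int) + 1) = ((k + 1 : Nat) : Int) by push_cast; ring,
    PySem.List.slice_natCast, PySem.List.slice_natCast]
  simp [List.drop_succ_cons]

lemma pvSlice_zero_succ (x : Int × Int) (l : List (Int × Int)) (b : Int) (hb : 0 ≤ b) :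
    PySem.List.slice (x :: l) (some 0) (some (b + 1)) = x :: PySem.List.slice l (some 0) (some b) := by
  obtain ⟨k, rfl⟩ := Int.eq_ofNat_of_zero_le hb
  rw [show ((k : Int) + 1) = ((k + 1 : Nat) : Int) by push_cast; ring,
    show ((0 : Int)) = ((0 : Nat) : Int) from rfl,
    PySem.List.slice_natCast, PySem.List.slice_natCast]
  simp

lemma pvZipMapShift (x : Int × Int) (l : List (Int × Int)) :
    ∀ (B : List Int) (c a : Int), (∀ b ∈ B, 0 ≤ b) → c = a + 1 → 0 ≤ a →
    ((c :: B.map (· + 1)).zip (B.map (· + 1))).map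
        (fun ab => PySem.List.slice (x :: l) (some ab.1) (some ab.2))
      = ((a :: B).zip B).map (fun ab => PySem.List.slice l (some ab.1) (some ab.2)) := by
  intro B
  induction B with
  | nil => intro c a _ _ _; simp
  | cons b B' ih =>
    intro c a hB hc ha
    simp only [List.map_cons, List.zip_cons_cons]
    rw [hc, pvSlice_shift x l a b ha (hB b List.mem_cons_self)]
    rw [ih (b + 1) b (fun y hy => hB y (List.mem_cons_of_mem b hy)) rfl (hB b List.mem_cons_self)]

lemma pvSl_eq_chunks (pts : List (Int × Int)) (h : pts ≠ []) : pvSl pts = pvChunks pts := by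
  induction pts with
  | nil => exact absurd rfl h
  | cons p l ih =>
    cases l with
    | nil =>
      show [PySem.List.slice [p] (some 0) (some 1)] = _
      rw [pvSlice_zero_one]; rfl
    | cons q rest =>
      have ihl := ih (by simp)
      have hmemB : ∀ x ∈ pvCuts (q :: rest) ++ [((q :: rest).length : Int)], 0 ≤ x := by
        intro x hx
        rcases List.mem_append.mp hx with h1 | h2
        · linarith [pvCuts_pos (q :: rest) x h1]
        · simp at h2; omega
      have hlen : (((p :: q :: rest).length : Nat) : Int) = ((q :: rest).length : Int) + 1 := by
        push_cast [List.length_cons]; ring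
      by_cases hg : 20 ≤ |q.2 - p.2|
      · -- a row boundary between p and q
        have hX : pvCuts (p :: q :: rest) ++ [((p :: q :: rest).length : Int)]
            = 1 :: (pvCuts (q :: rest) ++ [((q :: rest).length : Int)]).map (· + 1) := by
          rw [pvCuts_cons, hlen, if_pos hg]
          simp [List.map_append]
        simp only [pvSl, hX]
        rw [List.zip_cons_cons]
        simp only [List.map_cons]
        rw [pvSlice_zero_one]
        rw [pvZipMapShift p (q :: rest)
          (pvCuts (q :: rest) ++ [((q :: rest).length : Int)]) 1 0 hmemB (by norm_num) le_rfl]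
        rw [show ((0 :: (pvCuts (q :: rest) ++ [((q :: rest).length : Int)])).zip
              (pvCuts (q :: rest) ++ [((q :: rest).length : Int)])).map
              (fun ab => PySem.List.slice (q :: rest) (some ab.1) (some ab.2))
            = pvSl (q :: rest) from rfl]
        rw [ihl]
        simp [pvChunks, hg]
      · -- p joins q's row
        obtain ⟨m, M', hM⟩ : ∃ m M',
            pvCuts (q :: rest) ++ [((q :: rest).length : Int)] = m :: M' := by
          cases hcs : pvCuts (q :: rest) with
          | nil => exact ⟨((q :: rest).length : Int), [], rfl⟩
          | cons c cs' => exact ⟨c, cs' ++ [((q :: rest).length : Int)], rfl⟩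
        have hm0 : 0 ≤ m := hmemB m (by rw [hM]; exact List.mem_cons_self)
        have hX : pvCuts (p :: q :: rest) ++ [((p :: q :: rest).length : Int)]
            = (m :: M').map (· + 1) := by
          rw [pvCuts_cons, hlen, if_neg hg, ← hM]
          simp [List.map_append]
        simp only [pvSl, hX, List.map_cons]
        rw [List.zip_cons_cons]
        simp only [List.map_cons]
        rw [pvSlice_zero_succ p (q :: rest) m hm0]
        rw [pvZipMapShift p (q :: rest) M' (m + 1) m
          (fun y hy => hmemB y (hM ▸ List.mem_cons_of_mem m hy)) rfl hm0]
        obtain ⟨t, rs, hqt⟩ := pvChunks_cons q rest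
        have ihl' : PySem.List.slice (q :: rest) (some 0) (some m) ::
            ((m :: M').zip M').map
              (fun ab => PySem.List.slice (q :: rest) (some ab.1) (some ab.2))
            = (q :: t) :: rs := by
          rw [← hqt, ← ihl]
          simp only [pvSl, hM, List.zip_cons_cons, List.map_cons]
        obtain ⟨hhead, htail⟩ := List.cons.inj ihl'
        rw [hhead, htail]
        simp [pvChunks, hg, hqt]

-- ===== assembly =====

lemma pvA_chunks (ints : List (Int × Int)) (h : ints ≠ []) :
    sort_into_grid ints =
      (pvChunks (PySem.List.sorted2 ints (fun p => p.2) (fun p => p.1))).map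
        (fun r => PySem.List.sorted r (fun p => p.1)) := by
  have hperm := PySem.List.sorted2_perm ints (fun p => p.2) (fun p => p.1) false
  have hne : PySem.List.sorted2 ints (fun p => p.2) (fun p => p.1) ≠ [] := by
    intro hnil
    rw [hnil] at hperm
    exact h (List.perm_nil.mp hperm.symm)
  unfold sort_into_grid
  rw [if_neg h]
  obtain ⟨x, xs, hx⟩ := List.exists_cons_of_ne_nil hne
  rw [hx]
  show pvALoop [] [x] xs = _
  rw [pvALoop_glue xs, pvGlue_singleton]
  simp

lemma pvB_chunks (ints : List (Int × Int)) (h : ints ≠ []) :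
    sort_into_grid_alt ints =
      (pvChunks (PySem.List.sorted2 ints (fun p => p.2) (fun p => p.1))).map
        (fun r => PySem.List.sorted r (fun p => p.1)) := by
  have hperm := PySem.List.sorted2_perm ints (fun p => p.2) (fun p => p.1) false
  have hne : PySem.List.sorted2 ints (fun p => p.2) (fun p => p.1) ≠ [] := by
    intro hnil
    rw [hnil] at hperm
    exact h (List.perm_nil.mp hperm.symm)
  have e : sort_into_grid_alt ints
      = ((0 :: (pvCuts (PySem.List.sorted2 ints (fun p => p.2) (fun p => p.1)) ++
            [((PySem.List.sorted2 ints (fun p => p.2) (fun p => p.1)).length : Int)])).zip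
          (pvCuts (PySem.List.sorted2 ints (fun p => p.2) (fun p => p.1)) ++
            [((PySem.List.sorted2 ints (fun p => p.2) (fun p => p.1)).length : Int)])).map
          (fun ab => PySem.List.sorted
            (PySem.List.slice (PySem.List.sorted2 ints (fun p => p.2) (fun p => p.1))
              (some ab.1) (some ab.2)) (fun p => p.1)) := by
    unfold sort_into_grid_alt
    rw [if_neg h]
    simp only [PySem.List.slice_from_one, PySem.List.len_eq, List.cons_append, List.tail_cons]
    rfl
  rw [e]
  rw [show ((0 :: (pvCuts (PySem.List.sorted2 ints (fun p => p.2) (fun p => p.1)) ++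
            [((PySem.List.sorted2 ints (fun p => p.2) (fun p => p.1)).length : Int)])).zip
          (pvCuts (PySem.List.sorted2 ints (fun p => p.2) (fun p => p.1)) ++
            [((PySem.List.sorted2 ints (fun p => p.2) (fun p => p.1)).length : Int)])).map
          (fun ab => PySem.List.sorted
            (PySem.List.slice (PySem.List.sorted2 ints (fun p => p.2) (fun p => p.1))
              (some ab.1) (some ab.2)) (fun p => p.1))
      = (pvSl (PySem.List.sorted2 ints (fun p => p.2) (fun p => p.1))).map
          (fun r => PySem.List.sorted r (fun p => p.1)) from by
        simp only [pvSl, List.map_map]; rfl]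
  rw [pvSl_eq_chunks _ hne]

-- ===== VERDICT (by name: the statement is the Claim_ definition above) =====
theorem sort_into_grid_spec : Claim_equal_sort_into_grid := by
  intro ints _
  unfold Spec_sort_into_grid
  by_cases h : ints = []
  · subst h; rfl
  · rw [pvA_chunks ints h, pvB_chunks ints h]
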